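-- pv_equiv track=rewrite | github.com/nguyenhuuniem12022005/codePTIT | dayconnhonnhat.py | min_gcd_subarray_length
-- ===== SOURCE A (Python) =====
-- import math
--
-- def min_gcd_subarray_length(arr, n, k):
--     min_len = float('inf')
--
--     for i in range(n):
--         current_gcd = arr[i]
--         if current_gcd == k:
--             min_len = min(min_len, 1)
--             continue
--
--         for j in range(i + 1, n):
--             current_gcd = math.gcd(current_gcd, arr[j])
--
--             if current_gcd == k:
--                 min_len = min(min_len, j - i + 1)
--                 break
--             elif current_gcd < k:
--                 break
--
--     return min_len if min_len != float('inf') else -1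
-- ===== SOURCE B (Python) =====
-- import math
--
-- def _push(cur, g, s):
--     # append (g, s), merging with the last entry when it has the same gcd
--     # (keeps the latest start for each run of equal gcd values)
--     if cur and cur[-1][0] == g:
--         cur[-1] = (g, s)
--     else:
--         cur.append((g, s))
--
-- def min_gcd_subarray_length(arr, n, k):
--     best = None
--     prev = []  # (gcd of arr[s..j-1] as math.gcd, latest such start s), distinct gcds
--     for j in range(n):
--         x = arr[j]
--         if x == k:
--             best = 1 if best is None or best > 1 else best
--         cur = []
--         for g, s in prev:
--             _push(cur, math.gcd(g, x), s)
--         for g, s in cur:  # all these subarrays end at j and have length >= 2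
--             if g == k and (best is None or j - s + 1 < best):
--                 best = j - s + 1
--         _push(cur, abs(x), j)
--         prev = cur
--     return -1 if best is None else best
-- ===== Notes on version B (the rewrite author's own statement) =====
-- stated objective: alternative
-- what changed: Replaces the per-start rescan (restarting a gcd chain at every i, with break heuristics) by a single left-to-right pass that maintains, for the current endpoint j, the distinct gcd values of subarrays ending at j together with the latest start attaining each, updating this stack incrementally; worst-case cost drops from O(n^2 log V) to O(n log V), though A's early breaks make it comparably fast on typical inputs.
import Mathlib
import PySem

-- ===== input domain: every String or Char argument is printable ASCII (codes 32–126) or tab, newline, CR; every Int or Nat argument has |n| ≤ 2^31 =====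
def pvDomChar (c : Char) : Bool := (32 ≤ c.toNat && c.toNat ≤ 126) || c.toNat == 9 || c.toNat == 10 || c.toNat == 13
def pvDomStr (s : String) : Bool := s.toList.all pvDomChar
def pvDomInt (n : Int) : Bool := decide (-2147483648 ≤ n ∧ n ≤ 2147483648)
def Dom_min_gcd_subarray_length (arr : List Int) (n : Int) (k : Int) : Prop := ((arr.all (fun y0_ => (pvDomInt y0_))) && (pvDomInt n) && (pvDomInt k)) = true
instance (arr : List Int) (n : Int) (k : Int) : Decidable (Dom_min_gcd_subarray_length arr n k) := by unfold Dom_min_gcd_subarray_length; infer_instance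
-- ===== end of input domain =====

-- B replaces A's per-start rescans by one pass keeping, per endpoint, the distinct
-- subarray gcds with their latest starts (objective: alternative algorithm, same measured cost).
-- Python's float('inf') sentinel is modelled by Option Int (none = inf).

-- ===== PORT A =====
-- min(min_len, v) with min_len possibly inf
def pvMinO (m : Option Int) (v : Int) : Option Int :=
  match m with
  | none => some v
  | some a => some (min a v)

-- the inner 'for j in range(i+1, n)' loop of A, with its two breaks
def pvAInner (arr : List Int) (k : Int) (i : Int) (g : Int) (js : List Int) : Option Int :=
  match js with
  | [] => none
  | j :: rest =>
    let g' : Int := (Int.gcd g (PySem.List.pyGetD arr j 0) : Int)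
    if g' = k then some (j - i + 1)
    else if g' < k then none
    else pvAInner arr k i g' rest

def min_gcd_subarray_length (arr : List Int) (n : Int) (k : Int) : Int :=
  let m := (PySem.List.pyRange 0 n 1).foldl (fun (m : Option Int) i =>
    let cg := PySem.List.pyGetD arr i 0
    if cg = k then pvMinO m 1
    else
      match pvAInner arr k i cg (PySem.List.pyRange (i + 1) n 1) with
      | some v => pvMinO m v
      | none => m) none
  match m with
  | none => -1
  | some v => v

-- ===== PORT B =====
-- Source B's _push: append (g, s), merging with the last entry when the gcd is equal
def pvPush (c : List (Int × Int)) (g s : Int) : List (Int × Int) :=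
  match c.getLast? with
  | some p => if p.1 = g then c.dropLast ++ [(g, s)] else c ++ [(g, s)]
  | none => c ++ [(g, s)]

def min_gcd_subarray_length_alt (arr : List Int) (n : Int) (k : Int) : Int :=
  let st := (PySem.List.pyRange 0 n 1).foldl
    (fun (st : Option Int × List (Int × Int)) j =>
      let x := PySem.List.pyGetD arr j 0
      let best0 := if x = k then
          (match st.1 with
           | none => some (1 : Int)
           | some b => if 1 < b then some 1 else some b)
        else st.1
      let cur := st.2.foldl (fun c p => pvPush c (Int.gcd p.1 x : Int) p.2) []
      let best1 := cur.foldl (fun b p =>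
          if p.1 = k then
            (match b with
             | none => some (j - p.2 + 1)
             | some bb => if j - p.2 + 1 < bb then some (j - p.2 + 1) else some bb)
          else b) best0
      let cur2 := pvPush cur |x| j
      (best1, cur2)) (none, [])
  match st.1 with
  | none => -1
  | some v => v

-- ===== PRECONDITION & SPEC =====
-- Pre_ excludes exactly the calls with n > len(arr), on which Python A (and Python B)
-- raise IndexError; negative or zero n is accepted (A returns -1 there).
def Pre_min_gcd_subarray_length (arr : List Int) (n : Int) (k : Int) : Prop :=
  n ≤ (arr.length : Int)
instance (arr : List Int) (n : Int) (k : Int) : Decidable (Pre_min_gcd_subarray_length arr n k) := by unfold Pre_min_gcd_subarray_length; infer_instance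

def pvWitness_min_gcd_subarray_length : List Int × Int × Int := ([4, 6, 9], 3, 2)

def Spec_min_gcd_subarray_length (arr : List Int) (n : Int) (k : Int) (out : Int) : Prop := out = min_gcd_subarray_length_alt arr n k
instance (arr : List Int) (n : Int) (k : Int) (out : Int) : Decidable (Spec_min_gcd_subarray_length arr n k out) := by unfold Spec_min_gcd_subarray_length; infer_instance

-- ===== CLAIM (what is proved, stated in full; the proofs are below) =====
def Claim_equal_min_gcd_subarray_length : Prop := ∀ (arr : List Int) (n : Int) (k : Int), Dom_min_gcd_subarray_length arr n k → Pre_min_gcd_subarray_length arr n k → Spec_min_gcd_subarray_length arr n k (min_gcd_subarray_length arr n k)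

-- ===== LEMMAS AND PROOFS =====

theorem min_gcd_subarray_length_witness_ok :
    Dom_min_gcd_subarray_length pvWitness_min_gcd_subarray_length.1 pvWitness_min_gcd_subarray_length.2.1 pvWitness_min_gcd_subarray_length.2.2 ∧
    Pre_min_gcd_subarray_length pvWitness_min_gcd_subarray_length.1 pvWitness_min_gcd_subarray_length.2.1 pvWitness_min_gcd_subarray_length.2.2 := by
  constructor <;> decide


-- ---------- shared notions ----------

-- gcd step, as Python's math.gcd
def pvG (g a : Int) : Int := (Int.gcd g a : Int)

-- gcd of |arr[s]|, …, |arr[j]| (0 when the range is empty)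
def pvSeg (arr : List Int) (s j : Int) : Int :=
  (PySem.List.pyRange s (j + 1) 1).foldl (fun g t => pvG g (PySem.List.pyGetD arr t 0)) 0

-- a subarray arr[s..j] that A counts as having gcd k (length-1 compares the raw value)
def pvCand (arr : List Int) (n k : Int) (s j : Int) : Prop :=
  0 ≤ s ∧ s ≤ j ∧ j < n ∧
    (if s = j then PySem.List.pyGetD arr s 0 = k else pvSeg arr s j = k)

def pvLe (r : Option Int) (v : Int) : Prop := ∃ w, r = some w ∧ w ≤ v

-- min with none = +infinity
def pvOMin (a b : Option Int) : Option Int :=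
  match a, b with
  | none, b => b
  | a, none => a
  | some x, some y => some (min x y)

theorem pvMinO_eq (m : Option Int) (v : Int) : pvMinO m v = pvOMin m (some v) := by
  cases m <;> rfl

theorem pvOMin_none (m : Option Int) : pvOMin m none = m := by cases m <;> rfl

theorem pvLe_weaken {r : Option Int} {v v' : Int} (h : pvLe r v) (hv : v ≤ v') : pvLe r v' := by
  obtain ⟨w, hw, hle⟩ := h; exact ⟨w, hw, le_trans hle hv⟩

theorem pvLe_oMin_left {a : Option Int} (b : Option Int) {v : Int} (h : pvLe a v) :
    pvLe (pvOMin a b) v := by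
  obtain ⟨w, hw, hle⟩ := h
  subst hw
  cases b with
  | none => exact ⟨w, rfl, hle⟩
  | some y => exact ⟨min w y, rfl, le_trans (min_le_left _ _) hle⟩

theorem pvLe_oMin_right (a : Option Int) {b : Option Int} {v : Int} (h : pvLe b v) :
    pvLe (pvOMin a b) v := by
  obtain ⟨w, hw, hle⟩ := h
  subst hw
  cases a with
  | none => exact ⟨w, rfl, hle⟩
  | some x => exact ⟨min x w, rfl, le_trans (min_le_right _ _) hle⟩

theorem pvOMin_attain {a b : Option Int} {v : Int} (h : pvOMin a b = some v) :
    a = some v ∨ b = some v := by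
  cases a with
  | none => right; exact h
  | some x =>
    cases b with
    | none => left; exact h
    | some y =>
      simp only [pvOMin] at h
      rcases le_total x y with hxy | hxy
      · left; rw [min_eq_left hxy] at h; exact h
      · right; rw [min_eq_right hxy] at h; exact h

-- folding pvOMin over contributions: lower bounds and attainment
theorem pvFold_preserve {α : Type} (f : α → Option Int) :
    ∀ (l : List α) (acc : Option Int) (v : Int), pvLe acc v →
      pvLe (l.foldl (fun m x => pvOMin m (f x)) acc) v := by
  intro l
  induction l with
  | nil => intro acc v h; exact h
  | cons x t ih =>
    intro acc v h
    exact ih _ _ (pvLe_oMin_left _ h)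

theorem pvFold_le_mem {α : Type} (f : α → Option Int) :
    ∀ (l : List α) (acc : Option Int) (x : α), x ∈ l → ∀ u, f x = some u →
      pvLe (l.foldl (fun m x => pvOMin m (f x)) acc) u := by
  intro l
  induction l with
  | nil => intro acc x hx; cases hx
  | cons y t ih =>
    intro acc x hx u hu
    rcases List.mem_cons.mp hx with h | h
    · subst h
      refine pvFold_preserve f t _ u ?_
      show pvLe (pvOMin acc (f x)) u
      rw [hu]
      exact pvLe_oMin_right _ ⟨u, rfl, le_refl u⟩
    · exact ih _ _ h u hu

theorem pvFold_attain {α : Type} (f : α → Option Int) :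
    ∀ (l : List α) (acc : Option Int) (v : Int),
      l.foldl (fun m x => pvOMin m (f x)) acc = some v →
      acc = some v ∨ ∃ x ∈ l, f x = some v := by
  intro l
  induction l with
  | nil => intro acc v h; exact Or.inl h
  | cons y t ih =>
    intro acc v h
    rcases ih _ _ h with h' | ⟨x, hx, hfx⟩
    · rcases pvOMin_attain h' with h'' | h''
      · exact Or.inl h''
      · exact Or.inr ⟨y, List.mem_cons_self .., h''⟩
    · exact Or.inr ⟨x, List.mem_cons_of_mem _ hx, hfx⟩


-- ---------- pvSeg lemmas ----------

theorem pvG_natAbs_congr {g g' : Int} (h : g.natAbs = g'.natAbs) (x : Int) :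
    pvG g x = pvG g' x := by
  simp only [pvG, Int.gcd, h]

theorem pvSeg_self (arr : List Int) (s : Int) :
    pvSeg arr s s = |PySem.List.pyGetD arr s 0| := by
  simp only [pvSeg, PySem.List.pyRange_one_singleton, List.foldl_cons, List.foldl_nil]
  simp [pvG, Int.gcd]

theorem pvSeg_succ (arr : List Int) {s j : Int} (h : s ≤ j + 1) :
    pvSeg arr s (j + 1) = pvG (pvSeg arr s j) (PySem.List.pyGetD arr (j + 1) 0) := by
  simp only [pvSeg]
  rw [PySem.List.pyRange_one_succ_right h, List.foldl_append]
  rfl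

theorem pvSeg_dvd (arr : List Int) {s j j' : Int} (hjj : j ≤ j') :
    pvSeg arr s j' ∣ pvSeg arr s j := by
  induction j', hjj using Int.le_induction with
  | base => exact dvd_refl _
  | succ m hm ih =>
    · have hsm : s ≤ m + 1 ∨ m + 1 < s := by omega
      rcases hsm with hsm | hsm
      · rw [pvSeg_succ arr hsm]
        exact dvd_trans (Int.gcd_dvd_left _ _) ih
      · -- both ranges empty: s > m+1 > m ≥ j… impossible since j ≤ m and s ≤ ? not needed:
        -- if s > m+1 the segment is empty on both sides
        have h1 : PySem.List.pyRange s (m + 1 + 1) 1 = [] :=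
          PySem.List.pyRange_one_eq_nil (by omega)
        have h2 : pvSeg arr s (m + 1) = 0 := by simp [pvSeg, h1]
        have h3 : pvSeg arr s j = 0 := by
          have : PySem.List.pyRange s (j + 1) 1 = [] :=
            PySem.List.pyRange_one_eq_nil (by omega)
          simp [pvSeg, this]
        rw [h2, h3]

theorem pvSeg_split (arr : List Int) {s j0 j : Int} (hs : s ≤ j0) (hj : j0 ≤ j) :
    pvSeg arr s j = (PySem.List.pyRange (j0 + 1) (j + 1) 1).foldl
      (fun g t => pvG g (PySem.List.pyGetD arr t 0)) (pvSeg arr s j0) := by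
  simp only [pvSeg]
  rw [PySem.List.pyRange_one_append s (j0 + 1) (j + 1) (by omega) (by omega), List.foldl_append]

theorem pvSeg_zero_shift (arr : List Int) {s j0 j : Int} (hs : s ≤ j0) (hj : j0 ≤ j)
    (hz : pvSeg arr s j0 = 0) : pvSeg arr j0 j = pvSeg arr s j := by
  have hx : |PySem.List.pyGetD arr j0 0| = 0 := by
    rcases eq_or_lt_of_le hs with h | h
    · rw [h] at hz; rw [← pvSeg_self arr j0]; exact hz
    · have h1 : pvSeg arr s j0 = pvG (pvSeg arr s (j0 - 1)) (PySem.List.pyGetD arr j0 0) := by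
        have h2 : s ≤ (j0 - 1) + 1 := by omega
        have := pvSeg_succ arr h2
        simpa [sub_add_cancel] using this
      rw [h1] at hz
      simp only [pvG] at hz
      have hz' : Int.gcd (pvSeg arr s (j0 - 1)) (PySem.List.pyGetD arr j0 0) = 0 := by
        exact_mod_cast hz
      have := (Int.gcd_eq_zero_iff).mp hz'
      simp [this.2]
  rw [pvSeg_split arr hs hj, hz]
  rw [pvSeg_split arr (le_refl j0) hj, pvSeg_self, hx]


-- ---------- A side ----------

def pvPassOpt (arr : List Int) (n k i : Int) : Option Int :=
  let cg := PySem.List.pyGetD arr i 0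
  if cg = k then some 1
  else pvAInner arr k i cg (PySem.List.pyRange (i + 1) n 1)

def pvAFold (arr : List Int) (n k : Int) : Option Int :=
  (PySem.List.pyRange 0 n 1).foldl (fun m i => pvOMin m (pvPassOpt arr n k i)) none

theorem pvA_eq_fold (arr : List Int) (n k : Int) :
    min_gcd_subarray_length arr n k =
      (match pvAFold arr n k with
       | none => -1
       | some v => v) := by
  have hstep : (fun (m : Option Int) (i : Int) =>
      let cg := PySem.List.pyGetD arr i 0
      if cg = k then pvMinO m 1
      else
        match pvAInner arr k i cg (PySem.List.pyRange (i + 1) n 1) with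
        | some v => pvMinO m v
        | none => m)
      = fun m i => pvOMin m (pvPassOpt arr n k i) := by
    funext m i
    simp only [pvPassOpt]
    by_cases h : PySem.List.pyGetD arr i 0 = k
    · simp [h, pvMinO_eq]
    · simp only [h, if_false]
      cases hA : pvAInner arr k i (PySem.List.pyGetD arr i 0) (PySem.List.pyRange (i + 1) n 1) with
      | none => simp [pvOMin_none]
      | some v => simp [pvMinO_eq]
  simp only [min_gcd_subarray_length, pvAFold]
  rw [hstep]

theorem pvAInner_sound (arr : List Int) (n k i : Int) :
    ∀ (d : Nat) (p g : Int), (n - p).toNat = d → i < p →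
      g.natAbs = (pvSeg arr i (p - 1)).natAbs →
      ∀ v, pvAInner arr k i g (PySem.List.pyRange p n 1) = some v →
      ∃ j, p ≤ j ∧ j < n ∧ pvSeg arr i j = k ∧ v = j - i + 1 := by
  intro d
  induction d with
  | zero =>
    intro p g hd hip hg v hv
    rw [PySem.List.pyRange_one_eq_nil (by omega)] at hv
    simp [pvAInner] at hv
  | succ d ih =>
    intro p g hd hip hg v hv
    by_cases hpn : p < n
    · rw [PySem.List.pyRange_one_cons hpn] at hv
      have hg' : pvG g (PySem.List.pyGetD arr p 0) = pvSeg arr i p := by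
        rw [pvG_natAbs_congr hg (PySem.List.pyGetD arr p 0)]
        have h2 : i ≤ (p - 1) + 1 := by omega
        have h3 := pvSeg_succ arr h2
        simp only [sub_add_cancel] at h3
        exact h3.symm
      simp only [pvAInner, pvG] at hv hg' ⊢
      by_cases h1 : (Int.gcd g (PySem.List.pyGetD arr p 0) : Int) = k
      · rw [if_pos h1] at hv
        exact ⟨p, le_refl p, hpn, by rw [← hg']; exact h1, (Option.some_inj.mp hv).symm⟩
      · rw [if_neg h1] at hv
        by_cases h2 : (Int.gcd g (PySem.List.pyGetD arr p 0) : Int) < k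
        · rw [if_pos h2] at hv; cases hv
        · rw [if_neg h2] at hv
          obtain ⟨j, hj1, hj2, hj3, hj4⟩ := ih (p + 1) _ (by omega) (by omega)
            (by rw [hg']; congr 2; omega) v hv
          exact ⟨j, by omega, hj2, hj3, hj4⟩
    · rw [PySem.List.pyRange_one_eq_nil (by omega)] at hv
      simp [pvAInner] at hv

theorem pvAInner_complete (arr : List Int) (n k i : Int) :
    ∀ (d : Nat) (p g j : Int), (j - p).toNat = d → i < p → p ≤ j → j < n →
      g.natAbs = (pvSeg arr i (p - 1)).natAbs → pvSeg arr i j = k →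
      (∃ v, pvAInner arr k i g (PySem.List.pyRange p n 1) = some v ∧ v ≤ j - i + 1) ∨
      (∃ j0, p ≤ j0 ∧ j0 < j ∧ pvSeg arr i j0 = 0) := by
  intro d
  induction d with
  | zero =>
    -- p = j
    intro p g j hd hip hpj hjn hg hk
    have hpj' : p = j := by omega
    subst hpj'
    have hpn : p < n := hjn
    have hg' : pvG g (PySem.List.pyGetD arr p 0) = pvSeg arr i p := by
      rw [pvG_natAbs_congr hg (PySem.List.pyGetD arr p 0)]
      have h2 : i ≤ (p - 1) + 1 := by omega
      have h3 := pvSeg_succ arr h2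
      simp only [sub_add_cancel] at h3
      exact h3.symm
    left
    refine ⟨p - i + 1, ?_, le_refl _⟩
    rw [PySem.List.pyRange_one_cons hpn]
    simp only [pvAInner, pvG] at hg' ⊢
    rw [if_pos (by rw [hg']; exact hk)]
  | succ d ih =>
    intro p g j hd hip hpj hjn hg hk
    have hpn : p < n := by omega
    have hpj' : p < j := by omega
    have hg' : pvG g (PySem.List.pyGetD arr p 0) = pvSeg arr i p := by
      rw [pvG_natAbs_congr hg (PySem.List.pyGetD arr p 0)]
      have h2 : i ≤ (p - 1) + 1 := by omega
      have h3 := pvSeg_succ arr h2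
      simp only [sub_add_cancel] at h3
      exact h3.symm
    rw [PySem.List.pyRange_one_cons hpn]
    simp only [pvAInner, pvG] at hg' ⊢
    by_cases h1 : (Int.gcd g (PySem.List.pyGetD arr p 0) : Int) = k
    · left
      refine ⟨p - i + 1, ?_, by omega⟩
      rw [if_pos h1]
    · rw [if_neg h1]
      by_cases h2 : (Int.gcd g (PySem.List.pyGetD arr p 0) : Int) < k
      · -- gcd became < k: it must be 0, giving an all-zero prefix
        rw [if_pos h2]
        have hdvd : k ∣ (Int.gcd g (PySem.List.pyGetD arr p 0) : Int) := by
          have := pvSeg_dvd arr (s := i) hpj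
          rw [hk] at this
          rw [show ((Int.gcd g (PySem.List.pyGetD arr p 0) : Int)) = pvSeg arr i p from hg']
          exact this
        by_cases h0 : (Int.gcd g (PySem.List.pyGetD arr p 0) : Int) = 0
        · right
          exact ⟨p, le_refl p, hpj', by rw [← hg']; exact h0⟩
        · exfalso
          have hpos : 0 < (Int.gcd g (PySem.List.pyGetD arr p 0) : Int) := by
            have := Int.natCast_nonneg (Int.gcd g (PySem.List.pyGetD arr p 0))
            omega
          have := Int.le_of_dvd hpos hdvd
          omega
      · rw [if_neg h2]
        have := ih (p + 1) ((Int.gcd g (PySem.List.pyGetD arr p 0) : Int)) j (by omega)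
          (by omega) (by omega) hjn (by rw [hg']; congr 2; omega) hk
        rcases this with ⟨v, hv, hle⟩ | ⟨j0, hj0a, hj0b, hj0c⟩
        · left; exact ⟨v, hv, hle⟩
        · right; exact ⟨j0, by omega, hj0b, hj0c⟩

theorem pvPass_sound (arr : List Int) (n k i : Int) (h0 : 0 ≤ i) (hn : i < n) (v : Int)
    (h : pvPassOpt arr n k i = some v) :
    ∃ s j, pvCand arr n k s j ∧ v = j - s + 1 := by
  simp only [pvPassOpt] at h
  by_cases hcg : PySem.List.pyGetD arr i 0 = k
  · rw [if_pos hcg] at h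
    refine ⟨i, i, ⟨h0, le_refl i, hn, by rw [if_pos rfl]; exact hcg⟩, ?_⟩
    have := Option.some_inj.mp h
    omega
  · rw [if_neg hcg] at h
    have hg : (PySem.List.pyGetD arr i 0).natAbs = (pvSeg arr i ((i + 1) - 1)).natAbs := by
      have h1 : (i + 1) - 1 = i := by omega
      rw [h1, pvSeg_self, Int.natAbs_abs]
    obtain ⟨j, hj1, hj2, hj3, hj4⟩ :=
      pvAInner_sound arr n k i (n - (i + 1)).toNat (i + 1) (PySem.List.pyGetD arr i 0)
        rfl (by omega) hg v h
    refine ⟨i, j, ⟨h0, by omega, hj2, ?_⟩, hj4⟩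
    rw [if_neg (by omega)]
    exact hj3

theorem pvA_ub (arr : List Int) (n k : Int) :
    ∀ (d : Nat) (s j : Int), (j - s).toNat = d → pvCand arr n k s j →
      pvLe (pvAFold arr n k) (j - s + 1) := by
  intro d
  induction d using Nat.strong_induction_on with
  | _ d IH =>
    intro s j hd hc
    obtain ⟨h0, hsj, hjn, hcond⟩ := hc
    have hmem : s ∈ PySem.List.pyRange 0 n 1 :=
      PySem.List.mem_pyRange_one.mpr ⟨h0, by omega⟩
    by_cases hseq : s = j
    · subst hseq
      rw [if_pos rfl] at hcond
      have hpass : pvPassOpt arr n k s = some 1 := by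
        simp [pvPassOpt, hcond]
      have := pvFold_le_mem (pvPassOpt arr n k) (PySem.List.pyRange 0 n 1) none s hmem 1 hpass
      exact pvLe_weaken this (by omega)
    · rw [if_neg hseq] at hcond
      have hsj' : s < j := by omega
      by_cases hcg : PySem.List.pyGetD arr s 0 = k
      · have hpass : pvPassOpt arr n k s = some 1 := by simp [pvPassOpt, hcg]
        have := pvFold_le_mem (pvPassOpt arr n k) (PySem.List.pyRange 0 n 1) none s hmem 1 hpass
        exact pvLe_weaken this (by omega)
      · have hg : (PySem.List.pyGetD arr s 0).natAbs = (pvSeg arr s ((s + 1) - 1)).natAbs := by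
          have h1 : (s + 1) - 1 = s := by omega
          rw [h1, pvSeg_self, Int.natAbs_abs]
        have hcomp := pvAInner_complete arr n k s (j - (s + 1)).toNat (s + 1)
          (PySem.List.pyGetD arr s 0) j rfl (by omega) (by omega) hjn hg hcond
        rcases hcomp with ⟨v, hv, hle⟩ | ⟨j0, hj0a, hj0b, hj0c⟩
        · have hpass : pvPassOpt arr n k s = some v := by
            simp only [pvPassOpt]
            rw [if_neg hcg]
            exact hv
          have := pvFold_le_mem (pvPassOpt arr n k) (PySem.List.pyRange 0 n 1) none s hmem v hpass
          exact pvLe_weaken this hle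
        · have hcand : pvCand arr n k j0 j := by
            refine ⟨by omega, by omega, hjn, ?_⟩
            rw [if_neg (by omega)]
            rw [pvSeg_zero_shift arr (by omega) (by omega) hj0c]
            exact hcond
          have hres := IH (j - j0).toNat (by omega) j0 j rfl hcand
          exact pvLe_weaken hres (by omega)

theorem pvA_at (arr : List Int) (n k : Int) (v : Int) (h : pvAFold arr n k = some v) :
    ∃ s j, pvCand arr n k s j ∧ v = j - s + 1 := by
  rcases pvFold_attain (pvPassOpt arr n k) _ _ _ h with h' | ⟨i, hi, hfi⟩
  · cases h'
  · obtain ⟨h0, hn⟩ := PySem.List.mem_pyRange_one.mp hi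
    exact pvPass_sound arr n k i h0 hn v hfi


-- ---------- B side: the gcd stack ----------

def pvCollapse (l : List (Int × Int)) : List (Int × Int) :=
  l.foldl (fun c p => pvPush c p.1 p.2) []

-- all (gcd, start) pairs of subarrays ending at m (starts 0..m)
def pvPairs (arr : List Int) (m : Int) : List (Int × Int) :=
  (PySem.List.pyRange 0 (m + 1) 1).map (fun s => (pvSeg arr s m, s))

theorem pvConcatCases {α : Type} (l : List α) : l = [] ∨ ∃ (L : List α) (b : α), l = L ++ [b] := by
  rcases List.eq_nil_or_concat l with h | ⟨L, b, h⟩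
  · exact Or.inl h
  · exact Or.inr ⟨L, b, by simpa [List.concat_eq_append] using h⟩

theorem pvPush_nil (g s : Int) : pvPush [] g s = [(g, s)] := rfl

theorem pvPush_concat_eq (c : List (Int × Int)) (w : Int × Int) {g : Int} (s : Int)
    (h : w.1 = g) : pvPush (c ++ [w]) g s = c ++ [(g, s)] := by
  simp [pvPush, h]

theorem pvPush_concat_ne (c : List (Int × Int)) (w : Int × Int) {g : Int} (s : Int)
    (h : ¬ w.1 = g) : pvPush (c ++ [w]) g s = c ++ [w] ++ [(g, s)] := by
  simp [pvPush, h]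

theorem pvPush_push_same (c : List (Int × Int)) (g s s' : Int) :
    pvPush (pvPush c g s) g s' = pvPush c g s' := by
  rcases pvConcatCases c with rfl | ⟨c', w, rfl⟩
  · simp [pvPush]
  · by_cases h : w.1 = g
    · rw [pvPush_concat_eq _ _ _ h, pvPush_concat_eq _ _ _ rfl, pvPush_concat_eq _ _ _ h]
    · rw [pvPush_concat_ne _ _ _ h, pvPush_concat_eq _ _ _ rfl, pvPush_concat_ne _ _ _ h]

theorem pvCollapse_concat (L : List (Int × Int)) (z : Int × Int) :
    pvCollapse (L ++ [z]) = pvPush (pvCollapse L) z.1 z.2 := by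
  simp [pvCollapse, List.foldl_append]

theorem pvMem_push {q : Int × Int} {c : List (Int × Int)} {g s : Int}
    (h : q ∈ pvPush c g s) : q ∈ c ∨ q = (g, s) := by
  rcases pvConcatCases c with rfl | ⟨c', w, rfl⟩
  · rw [pvPush_nil] at h
    right; simpa using h
  · by_cases hw : w.1 = g
    · rw [pvPush_concat_eq _ _ _ hw] at h
      rcases List.mem_append.mp h with h' | h'
      · left; exact List.mem_append.mpr (Or.inl h')
      · right; simpa using h'
    · rw [pvPush_concat_ne _ _ _ hw] at h
      rcases List.mem_append.mp h with h' | h'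
      · left; exact h'
      · right; simpa using h'

theorem pvMem_push_self (c : List (Int × Int)) (g s : Int) : (g, s) ∈ pvPush c g s := by
  rcases pvConcatCases c with rfl | ⟨c', w, rfl⟩
  · rw [pvPush_nil]; exact List.mem_singleton.mpr rfl
  · by_cases hw : w.1 = g
    · rw [pvPush_concat_eq _ _ _ hw]; simp
    · rw [pvPush_concat_ne _ _ _ hw]; simp

theorem pvPush_cover {q : Int × Int} {c : List (Int × Int)} {g s : Int}
    (hq : q ∈ c) (hs : q.2 ≤ s) :
    ∃ q' ∈ pvPush c g s, q'.1 = q.1 ∧ q.2 ≤ q'.2 := by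
  rcases pvConcatCases c with rfl | ⟨c', w, rfl⟩
  · cases hq
  · by_cases hw : w.1 = g
    · rw [pvPush_concat_eq _ _ _ hw]
      rcases List.mem_append.mp hq with h' | h'
      · exact ⟨q, List.mem_append.mpr (Or.inl h'), rfl, le_refl _⟩
      · have hqw : q = w := by simpa using h'
        subst hqw
        exact ⟨(g, s), List.mem_append.mpr (Or.inr (List.mem_singleton.mpr rfl)),
          by simp [← hw], by simpa using hs⟩
    · rw [pvPush_concat_ne _ _ _ hw]
      exact ⟨q, List.mem_append.mpr (Or.inl hq), rfl, le_refl _⟩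

theorem pvCollapse_subset {q : Int × Int} :
    ∀ {L : List (Int × Int)}, q ∈ pvCollapse L → q ∈ L := by
  intro L
  induction L using List.reverseRecOn with
  | nil => intro h; simpa [pvCollapse] using h
  | append_singleton L z ih =>
    intro h
    rw [pvCollapse_concat] at h
    rcases pvMem_push h with h' | h'
    · exact List.mem_append.mpr (Or.inl (ih h'))
    · rw [h']; simp

theorem pvCollapse_cover {q : Int × Int} :
    ∀ {L : List (Int × Int)}, q ∈ L → L.Pairwise (fun a b => a.2 ≤ b.2) →
      ∃ q' ∈ pvCollapse L, q'.1 = q.1 ∧ q.2 ≤ q'.2 := by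
  intro L
  induction L using List.reverseRecOn with
  | nil => intro h; cases h
  | append_singleton L z ih =>
    intro hq hpw
    have hpwL : L.Pairwise (fun a b => a.2 ≤ b.2) :=
      (List.pairwise_append.mp hpw).1
    have hbound : ∀ a ∈ L, a.2 ≤ z.2 := by
      intro a ha
      exact (List.pairwise_append.mp hpw).2.2 a ha z (List.mem_singleton.mpr rfl)
    rw [pvCollapse_concat]
    rcases List.mem_append.mp hq with h' | h'
    · obtain ⟨q', hq'mem, hq'key, hq'le⟩ := ih h' hpwL
      have hq'L : q' ∈ L := pvCollapse_subset hq'mem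
      obtain ⟨q'', hq''mem, hq''key, hq''le⟩ :=
        pvPush_cover hq'mem (hbound q' hq'L)
      exact ⟨q'', hq''mem, by rw [hq''key, hq'key], le_trans hq'le hq''le⟩
    · have hqz : q = z := by simpa using h'
      subst hqz
      exact ⟨(q.1, q.2), pvMem_push_self _ _ _, rfl, le_refl _⟩

theorem pvCollapse_push_map (h : Int → Int) (M : List (Int × Int)) (g s : Int) :
    pvCollapse ((pvPush M g s).map (fun p => (h p.1, p.2))) =
      pvPush (pvCollapse (M.map (fun p => (h p.1, p.2)))) (h g) s := by
  rcases pvConcatCases M with rfl | ⟨M', w, rfl⟩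
  · rfl
  · by_cases hw : w.1 = g
    · rw [pvPush_concat_eq _ _ _ hw, List.map_append, List.map_append, List.map_singleton,
        List.map_singleton, pvCollapse_concat, pvCollapse_concat]
      simp only [hw]
      rw [pvPush_push_same]
    · rw [pvPush_concat_ne _ _ _ hw, List.map_append, List.map_singleton, pvCollapse_concat]

theorem pvCollapse_map_collapse (h : Int → Int) (L : List (Int × Int)) :
    pvCollapse ((pvCollapse L).map (fun p => (h p.1, p.2))) =
      pvCollapse (L.map (fun p => (h p.1, p.2))) := by
  induction L using List.reverseRecOn with
  | nil => rfl
  | append_singleton L z ih =>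
    rw [pvCollapse_concat, pvCollapse_push_map, ih, List.map_append, List.map_singleton,
      pvCollapse_concat]


-- ---------- B side: the scan ----------

-- the loop body of B's single pass (identical to the lambda in the port of B)
def pvBStep (arr : List Int) (k : Int) (st : Option Int × List (Int × Int)) (j : Int) :
    Option Int × List (Int × Int) :=
  let x := PySem.List.pyGetD arr j 0
  let best0 := if x = k then
      (match st.1 with
       | none => some (1 : Int)
       | some b => if 1 < b then some 1 else some b)
    else st.1
  let cur := st.2.foldl (fun c p => pvPush c (Int.gcd p.1 x : Int) p.2) []
  let best1 := cur.foldl (fun b p =>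
      if p.1 = k then
        (match b with
         | none => some (j - p.2 + 1)
         | some bb => if j - p.2 + 1 < bb then some (j - p.2 + 1) else some bb)
      else b) best0
  let cur2 := pvPush cur |x| j
  (best1, cur2)

theorem pvB_eq_fold (arr : List Int) (n k : Int) :
    min_gcd_subarray_length_alt arr n k =
      (match ((PySem.List.pyRange 0 n 1).foldl (pvBStep arr k) (none, [])).1 with
       | none => -1
       | some v => v) := rfl

theorem pvBStep_char (arr : List Int) (k : Int) (st : Option Int × List (Int × Int)) (j : Int) :
    pvBStep arr k st j =
      ((pvCollapse (st.2.map (fun p => (pvG p.1 (PySem.List.pyGetD arr j 0), p.2)))).foldl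
         (fun b q => pvOMin b (if q.1 = k then some (j - q.2 + 1) else none))
         (pvOMin st.1 (if PySem.List.pyGetD arr j 0 = k then some 1 else none)),
       pvPush (pvCollapse (st.2.map (fun p => (pvG p.1 (PySem.List.pyGetD arr j 0), p.2))))
         |PySem.List.pyGetD arr j 0| j) := by
  simp only [pvBStep]
  have hcur : st.2.foldl (fun c p => pvPush c (Int.gcd p.1 (PySem.List.pyGetD arr j 0) : Int) p.2) [] =
      pvCollapse (st.2.map (fun p => (pvG p.1 (PySem.List.pyGetD arr j 0), p.2))) := by
    rw [pvCollapse, List.foldl_map]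
    rfl
  have hbest0 : (if PySem.List.pyGetD arr j 0 = k then
      (match st.1 with
       | none => some (1 : Int)
       | some b => if 1 < b then some 1 else some b)
    else st.1) = pvOMin st.1 (if PySem.List.pyGetD arr j 0 = k then some 1 else none) := by
    by_cases hx : PySem.List.pyGetD arr j 0 = k
    · rw [if_pos hx, if_pos hx]
      cases st.1 with
      | none => rfl
      | some b =>
        simp only [pvOMin]
        rw [min_def]
        split_ifs <;> simp only [Option.some.injEq] <;> omega
    · rw [if_neg hx, if_neg hx, pvOMin_none]
  have hscan : (fun (b : Option Int) (p : Int × Int) =>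
      if p.1 = k then
        (match b with
         | none => some (j - p.2 + 1)
         | some bb => if j - p.2 + 1 < bb then some (j - p.2 + 1) else some bb)
      else b)
      = fun b q => pvOMin b (if q.1 = k then some (j - q.2 + 1) else none) := by
    funext b q
    by_cases hq : q.1 = k
    · rw [if_pos hq, if_pos hq]
      cases b with
      | none => rfl
      | some bb =>
        simp only [pvOMin]
        rw [min_def]
        split_ifs <;> simp only [Option.some.injEq] <;> omega
    · rw [if_neg hq, if_neg hq, pvOMin_none]
  rw [hcur, hbest0, hscan]

theorem pvB_inv (arr : List Int) (n k : Int) :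
    ∀ (m : Nat), (m : Int) ≤ n →
      (((PySem.List.pyRange 0 (m : Int) 1).foldl (pvBStep arr k) (none, [])).2
          = pvCollapse (pvPairs arr ((m : Int) - 1))
       ∧ (∀ s j, pvCand arr n k s j → j < (m : Int) →
            pvLe ((PySem.List.pyRange 0 (m : Int) 1).foldl (pvBStep arr k) (none, [])).1 (j - s + 1))
       ∧ (∀ v, ((PySem.List.pyRange 0 (m : Int) 1).foldl (pvBStep arr k) (none, [])).1 = some v →
            ∃ s j, pvCand arr n k s j ∧ j < (m : Int) ∧ v = j - s + 1)) := by
  intro m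
  induction m with
  | zero =>
    intro _
    have h0 : PySem.List.pyRange 0 ((0 : Nat) : Int) 1 = [] :=
      PySem.List.pyRange_one_eq_nil (by norm_num)
    have h1 : PySem.List.pyRange 0 (((0 : Nat) : Int) - 1 + 1) 1 = [] :=
      PySem.List.pyRange_one_eq_nil (by norm_num)
    refine ⟨?_, ?_, ?_⟩
    · rw [h0]
      simp [pvPairs, pvCollapse]
    · intro s j hc hj
      obtain ⟨hs0, hsj, _, _⟩ := hc
      exfalso
      push_cast at hj
      omega
    · intro v hv
      rw [h0] at hv
      cases hv
  | succ m ih =>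
    intro hm1
    have hmn : (m : Int) < n := by push_cast at hm1; omega
    obtain ⟨ih2, ihub, ihat⟩ := ih (by omega)
    have hcast : (((m + 1 : Nat)) : Int) = (m : Int) + 1 := by push_cast; ring
    rw [hcast]
    rw [PySem.List.pyRange_one_succ_right (by exact_mod_cast Nat.zero_le m), List.foldl_append,
      List.foldl_cons, List.foldl_nil]
    rw [pvBStep_char]
    rw [ih2]
    rw [pvCollapse_map_collapse (fun g => pvG g (PySem.List.pyGetD arr (m : Int) 0))]
    have hpairs : (pvPairs arr ((m : Int) - 1)).map
        (fun p => (pvG p.1 (PySem.List.pyGetD arr (m : Int) 0), p.2)) =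
        (PySem.List.pyRange 0 (m : Int) 1).map (fun s => (pvSeg arr s (m : Int), s)) := by
      simp only [pvPairs, List.map_map]
      rw [show (m : Int) - 1 + 1 = (m : Int) by ring]
      apply List.map_congr_left
      intro s hs
      obtain ⟨hs0, hsm⟩ := PySem.List.mem_pyRange_one.mp hs
      simp only [Function.comp]
      have h2 : s ≤ ((m : Int) - 1) + 1 := by omega
      have h3 := pvSeg_succ arr h2
      rw [show ((m : Int) - 1) + 1 = (m : Int) by ring] at h3
      rw [← h3]
    rw [hpairs]
    refine ⟨?_, ?_, ?_⟩
    · -- the stack after processing endpoint m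
      rw [show (m : Int) + 1 - 1 = (m : Int) by ring]
      simp only [pvPairs]
      rw [PySem.List.pyRange_one_succ_right (by exact_mod_cast Nat.zero_le m), List.map_append,
        List.map_singleton, pvCollapse_concat]
      rw [pvSeg_self]
    · -- lower bound
      intro s j hc hj
      by_cases hjm : j < (m : Int)
      · exact pvFold_preserve _ _ _ _ (pvLe_oMin_left _ (ihub s j hc hjm))
      · have hjm' : j = (m : Int) := by omega
        subst hjm'
        obtain ⟨h0, hsj, hjn, hcond⟩ := hc
        by_cases hs : s = (m : Int)
        · rw [if_pos hs] at hcond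
          rw [hs] at hcond
          rw [if_pos hcond]
          refine pvFold_preserve _ _ _ _ (pvLe_weaken (pvLe_oMin_right _ ⟨1, rfl, le_refl 1⟩) (by omega))
        · rw [if_neg hs] at hcond
          have hmem : (pvSeg arr s (m : Int), s) ∈
              (PySem.List.pyRange 0 (m : Int) 1).map (fun s => (pvSeg arr s (m : Int), s)) :=
            List.mem_map.mpr ⟨s, PySem.List.mem_pyRange_one.mpr ⟨h0, by omega⟩, rfl⟩
          have hpw : ((PySem.List.pyRange 0 (m : Int) 1).map
              (fun s => (pvSeg arr s (m : Int), s))).Pairwise (fun a b => a.2 ≤ b.2) := by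
            refine List.Pairwise.map _ ?_ (PySem.List.pairwise_lt_pyRange_one 0 (m : Int))
            intro a b hab
            simpa using le_of_lt hab
          obtain ⟨q', hq'mem, hq'key, hq'le⟩ := pvCollapse_cover hmem hpw
          have hcontrib : (if q'.1 = k then some ((m : Int) - q'.2 + 1) else none) =
              some ((m : Int) - q'.2 + 1) := by
            rw [if_pos (by rw [hq'key]; exact hcond)]
          refine pvLe_weaken (pvFold_le_mem _ _ _ q' hq'mem _ hcontrib) ?_
          have hsle : s ≤ q'.2 := hq'le
          omega
    · -- attainment
      intro v hv
      rcases pvFold_attain (fun q : Int × Int => if q.1 = k then some ((m : Int) - q.2 + 1) else none)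
        _ _ v hv with hb0 | ⟨q, hq, hfq⟩
      · rcases pvOMin_attain hb0 with hst | hcontrib
        · obtain ⟨s, j, hc, hj, hveq⟩ := ihat v hst
          exact ⟨s, j, hc, by omega, hveq⟩
        · by_cases hx : PySem.List.pyGetD arr (m : Int) 0 = k
          · rw [if_pos hx] at hcontrib
            refine ⟨(m : Int), (m : Int),
              ⟨by exact_mod_cast Nat.zero_le m, le_refl _, hmn, by rw [if_pos rfl]; exact hx⟩,
              by omega, ?_⟩
            have := Option.some_inj.mp hcontrib
            omega
          · rw [if_neg hx] at hcontrib
            cases hcontrib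
      · by_cases hqk : q.1 = k
        · rw [if_pos hqk] at hfq
          have hqmem : q ∈ (PySem.List.pyRange 0 (m : Int) 1).map
              (fun s => (pvSeg arr s (m : Int), s)) := pvCollapse_subset hq
          obtain ⟨s, hs, hqeq⟩ := List.mem_map.mp hqmem
          obtain ⟨hs0, hsm⟩ := PySem.List.mem_pyRange_one.mp hs
          refine ⟨s, (m : Int),
            ⟨hs0, by omega, hmn, by rw [if_neg (by omega)]; rw [← hqeq] at hqk; exact hqk⟩,
            by omega, ?_⟩
          have h1 := Option.some_inj.mp hfq
          have hq2 : s = q.2 := by rw [← hqeq]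
          omega
        · rw [if_neg hqk] at hfq
          cases hfq

-- ---------- final: both compute the same minimum ----------

theorem pvOpt_unique (C : Int → Int → Prop) (r1 r2 : Option Int)
    (ub1 : ∀ s j, C s j → pvLe r1 (j - s + 1))
    (at1 : ∀ v, r1 = some v → ∃ s j, C s j ∧ v = j - s + 1)
    (ub2 : ∀ s j, C s j → pvLe r2 (j - s + 1))
    (at2 : ∀ v, r2 = some v → ∃ s j, C s j ∧ v = j - s + 1) : r1 = r2 := by
  cases h1 : r1 with
  | none =>
    cases h2 : r2 with
    | none => rfl
    | some v2 =>
      obtain ⟨s, j, hc, _⟩ := at2 v2 h2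
      obtain ⟨w, hw, _⟩ := ub1 s j hc
      rw [h1] at hw
      cases hw
  | some v1 =>
    cases h2 : r2 with
    | none =>
      obtain ⟨s, j, hc, _⟩ := at1 v1 h1
      obtain ⟨w, hw, _⟩ := ub2 s j hc
      rw [h2] at hw
      cases hw
    | some v2 =>
      obtain ⟨s1, j1, hc1, hv1⟩ := at1 v1 h1
      obtain ⟨w2, hw2, hle2⟩ := ub2 s1 j1 hc1
      rw [h2] at hw2
      obtain ⟨s2, j2, hc2, hv2⟩ := at2 v2 h2
      obtain ⟨w1, hw1, hle1⟩ := ub1 s2 j2 hc2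
      rw [h1] at hw1
      have e1 : w2 = v2 := (Option.some_inj.mp hw2).symm
      have e2 : w1 = v1 := (Option.some_inj.mp hw1).symm
      subst e1; subst e2
      congr 1
      omega

-- ===== VERDICT (by name: the statement is the Claim_ definition above) =====
theorem min_gcd_subarray_length_spec : Claim_equal_min_gcd_subarray_length := by
  intro arr n k _hdom _hpre
  unfold Spec_min_gcd_subarray_length
  rw [pvA_eq_fold, pvB_eq_fold]
  by_cases hn : 0 ≤ n
  · obtain ⟨_, ubB, atB⟩ := pvB_inv arr n k n.toNat (by omega)
    have hcast : ((n.toNat : Nat) : Int) = n := Int.toNat_of_nonneg hn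
    rw [hcast] at ubB atB
    have hAB : pvAFold arr n k =
        ((PySem.List.pyRange 0 n 1).foldl (pvBStep arr k) (none, [])).1 := by
      apply pvOpt_unique (fun s j => pvCand arr n k s j)
      · intro s j hc
        exact pvA_ub arr n k (j - s).toNat s j rfl hc
      · exact pvA_at arr n k
      · intro s j hc
        exact ubB s j hc hc.2.2.1
      · intro v hv
        obtain ⟨s, j, hc, _, hveq⟩ := atB v hv
        exact ⟨s, j, hc, hveq⟩
    rw [hAB]
  · have h1 : PySem.List.pyRange 0 n 1 = [] := PySem.List.pyRange_one_eq_nil (by omega)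
    simp [pvAFold, h1]
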